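-- pv_equiv track=rewrite | github.com/MrK3w/skriptovaci-jazyky | lesson4/cv5.py | replace_signs
-- ===== SOURCE A (Python) =====
-- def replace_signs(words):
--     signs = ['.',',','?','!']
--     replaced_list = []
--     for e in words:
--         for sign in signs:
--              e = e.replace(sign, '')
--         e = e.lower()
--         replaced_list.append(e)
--     return replaced_list
-- ===== SOURCE B (Python) =====
-- def replace_signs(words):
--     signs = {'.', ',', '?', '!'}
--     return [''.join(c for c in e if c not in signs).lower() for e in words]
-- ===== Notes on version B (the rewrite author's own statement) =====
-- stated objective: simpler
-- what changed: Replaces the per-word chain of four sequential str.replace passes with a single character-filtering pass against a set of punctuation chars, expressed as one list comprehension.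
import Mathlib
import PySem

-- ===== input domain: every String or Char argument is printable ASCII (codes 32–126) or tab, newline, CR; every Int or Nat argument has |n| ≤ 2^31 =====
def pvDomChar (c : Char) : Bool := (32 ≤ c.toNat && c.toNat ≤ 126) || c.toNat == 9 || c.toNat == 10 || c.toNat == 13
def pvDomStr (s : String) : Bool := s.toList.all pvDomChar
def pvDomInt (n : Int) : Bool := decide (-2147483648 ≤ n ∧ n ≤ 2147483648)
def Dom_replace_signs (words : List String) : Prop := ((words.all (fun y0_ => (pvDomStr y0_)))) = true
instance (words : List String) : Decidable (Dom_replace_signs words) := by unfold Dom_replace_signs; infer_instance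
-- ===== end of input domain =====

-- B replaces A's four sequential per-word str.replace passes by one character-filtering
-- pass (a list comprehension over a punctuation set); objective: simpler, same result.

-- ===== PORT A =====
def replace_signs (words : List String) : List String :=
  let signs : List String := [".", ",", "?", "!"]
  words.foldl (fun replaced_list e =>
    let e := signs.foldl (fun e sign => PySem.Str.replace e sign "") e
    let e := PySem.Str.lower e
    replaced_list ++ [e]) []

-- ===== PORT B =====
def replace_signs_alt (words : List String) : List String :=
  let signs : PySem.Set Char := PySem.Set.ofList ['.', ',', '?', '!']
  words.map (fun e =>
    PySem.Str.lower (String.ofList (e.toList.filter (fun c => !(PySem.Set.contains signs c)))))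

-- ===== PRECONDITION & SPEC =====
def Spec_replace_signs (words : List String) (out : List String) : Prop := out = replace_signs_alt words
instance (words : List String) (out : List String) : Decidable (Spec_replace_signs words out) := by unfold Spec_replace_signs; infer_instance

-- ===== CLAIM (what is proved, stated in full; the proofs are below) =====
def Claim_equal_replace_signs : Prop := ∀ (words : List String), Dom_replace_signs words → Spec_replace_signs words (replace_signs words)

-- ===== LEMMAS AND PROOFS =====

-- replace.go with a single-char pattern and empty replacement filters that char out
theorem go_single_filter (c : Char) (fuel : Nat) (l acc : List Char) (h : l.length ≤ fuel) :
    PySem.Chars.replace.go [c] [] fuel l acc = acc.reverse ++ l.filter (fun x => x != c) := by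
  induction fuel generalizing l acc with
  | zero =>
    cases l with
    | nil => simp [PySem.Chars.replace.go]
    | cons a t => simp at h
  | succ n ih =>
    cases l with
    | nil => simp [PySem.Chars.replace.go]
    | cons a t =>
      simp only [List.length_cons, Nat.succ_le_succ_iff] at h
      by_cases hc : a = c
      · subst hc
        rw [show PySem.Chars.replace.go [a] [] (n+1) (a :: t) acc =
            PySem.Chars.replace.go [a] [] n (List.drop 1 (a :: t)) ([].reverse ++ acc) by
          simp [PySem.Chars.replace.go, List.isPrefixOf]]
        simp [ih _ _ h]
      · rw [show PySem.Chars.replace.go [c] [] (n+1) (a :: t) acc =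
            PySem.Chars.replace.go [c] [] n t (a :: acc) by
          simp [PySem.Chars.replace.go, List.isPrefixOf, Ne.symm hc]]
        rw [ih _ _ h]
        simp [hc]

theorem replace_single_filter (c : Char) (s : List Char) :
    PySem.Chars.replace s [c] [] = s.filter (fun x => x != c) := by
  rw [show PySem.Chars.replace s [c] [] = PySem.Chars.replace.go [c] [] s.length s [] by
    simp [PySem.Chars.replace]]
  simpa using go_single_filter c s.length s [] le_rfl

theorem word_eq (e : String) :
    PySem.Str.lower (PySem.Str.replace (PySem.Str.replace (PySem.Str.replace
      (PySem.Str.replace e "." "") "," "") "?" "") "!" "")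
    = PySem.Str.lower (String.ofList (e.toList.filter
        (fun c => !(PySem.Set.contains (PySem.Set.ofList ['.', ',', '?', '!']) c)))) := by
  apply String.toList_injective
  simp only [PySem.Str.toList_lower, PySem.Str.toList_replace, String.toList_ofList]
  simp only [show (".".toList) = ['.'] from rfl, show (",".toList) = [','] from rfl,
    show ("?".toList) = ['?'] from rfl, show ("!".toList) = ['!'] from rfl,
    show ("".toList) = ([] : List Char) from rfl]
  simp only [replace_single_filter, List.filter_filter]
  congr 1
  apply List.filter_congr
  intro c _
  simp [PySem.Set.contains, PySem.Set.ofList, PySem.Set.add]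
  by_cases h1 : c = '.' <;> by_cases h2 : c = ',' <;> by_cases h3 : c = '?' <;>
    by_cases h4 : c = '!' <;> simp_all

theorem foldl_append_map (f : String → String) (l acc : List String) :
    l.foldl (fun r e => r ++ [f e]) acc = acc ++ l.map f := by
  induction l generalizing acc with
  | nil => simp
  | cons a t ih => simp [List.foldl, ih]

-- ===== VERDICT (by name: the statement is the Claim_ definition above) =====
theorem replace_signs_spec : Claim_equal_replace_signs := by
  intro words _
  unfold Spec_replace_signs replace_signs replace_signs_alt
  simp only [List.foldl]
  rw [foldl_append_map]
  simp only [List.nil_append]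
  exact List.map_congr_left fun e _ => word_eq e
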